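-- pv_equiv track=rewrite | github.com/HarshCasper/NeoAlgo | Python/cp/adjacent_elements_product.py | MaxAdjacentProduct
-- ===== SOURCE A (Python) =====
-- def MaxAdjacentProduct(intList):
--     max = intList[0]*intList[1]
--     a = 0
--     b = 1
--     for i in range(1, len(intList) - 1):
--         if(intList[i]*intList[i+1] > max):
--             a = i
--             b = i+1
--             max = intList[i]*intList[i+1]
--     return(a, b, max)
-- ===== SOURCE B (Python) =====
-- def MaxAdjacentProduct(intList):
--     products = [x * y for x, y in zip(intList, intList[1:])]
--     best = max(products)
--     a = products.index(best)
--     return (a, a + 1, best)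
-- ===== Notes on version B (the rewrite author's own statement) =====
-- stated objective: simpler
-- what changed: Replaces the fused index-tracking loop over range(1, len-1) with a table of adjacent products followed by max() and .index() to locate the first maximum.
import Mathlib
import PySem

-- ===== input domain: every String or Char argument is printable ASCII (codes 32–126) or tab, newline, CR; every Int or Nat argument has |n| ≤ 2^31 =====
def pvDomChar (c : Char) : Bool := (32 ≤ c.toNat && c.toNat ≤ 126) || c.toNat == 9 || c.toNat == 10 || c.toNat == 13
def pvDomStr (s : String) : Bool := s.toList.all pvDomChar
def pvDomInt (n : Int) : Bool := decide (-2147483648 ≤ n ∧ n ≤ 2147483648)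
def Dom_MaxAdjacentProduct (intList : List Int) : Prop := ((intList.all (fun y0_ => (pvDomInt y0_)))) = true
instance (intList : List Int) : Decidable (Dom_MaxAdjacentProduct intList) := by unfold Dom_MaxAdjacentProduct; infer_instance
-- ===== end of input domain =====

-- B builds the list of adjacent products and locates its first maximum with max()/index(),
-- replacing A's fused index-tracking loop; objective: simpler decomposition, same O(n) cost.

-- ===== PORT A =====
-- step of A's for-loop: state (a, b, max), update when intList[i]*intList[i+1] > max
def stepA (intList : List Int) (st : Int × Int × Int) (i : Int) : Int × Int × Int :=
  if PySem.List.pyGetD intList i 0 * PySem.List.pyGetD intList (i + 1) 0 > st.2.2 then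
    (i, i + 1, PySem.List.pyGetD intList i 0 * PySem.List.pyGetD intList (i + 1) 0)
  else st

def MaxAdjacentProduct (intList : List Int) : Int × Int × Int :=
  (PySem.List.pyRange 1 ((intList.length : Int) - 1) 1).foldl (stepA intList)
    (0, 1, PySem.List.pyGetD intList 0 0 * PySem.List.pyGetD intList 1 0)

-- ===== PORT B =====
def MaxAdjacentProduct_alt (intList : List Int) : Int × Int × Int :=
  let products := List.zipWith (· * ·) intList (PySem.List.slice intList (some 1) none)
  let best := (PySem.List.max? products (fun y => y)).getD 0
  let a := (PySem.List.index? products best).getD 0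
  ((a : Int), (a : Int) + 1, best)

-- ===== PRECONDITION & SPEC =====
-- Pre_ excludes lists with fewer than 2 elements, on which A raises IndexError (B raises ValueError).
def Pre_MaxAdjacentProduct (intList : List Int) : Prop := 2 ≤ intList.length
instance (intList : List Int) : Decidable (Pre_MaxAdjacentProduct intList) := by
  unfold Pre_MaxAdjacentProduct; infer_instance

def pvWitness_MaxAdjacentProduct : List Int := [3, -1, 4]

def Spec_MaxAdjacentProduct (intList : List Int) (out : Int × Int × Int) : Prop :=
  out = MaxAdjacentProduct_alt intList
instance (intList : List Int) (out : Int × Int × Int) : Decidable (Spec_MaxAdjacentProduct intList out) := by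
  unfold Spec_MaxAdjacentProduct; infer_instance

-- ===== CLAIM (what is proved, stated in full; the proofs are below) =====
def Claim_equal_MaxAdjacentProduct : Prop := ∀ (intList : List Int), Dom_MaxAdjacentProduct intList → Pre_MaxAdjacentProduct intList → Spec_MaxAdjacentProduct intList (MaxAdjacentProduct intList)

-- ===== LEMMAS AND PROOFS =====

-- proof helper: A's loop, rephrased structurally over the suffix of adjacent products
def runA3 : List Int → Int → Int × Int × Int → Int × Int × Int
  | [], _, st => st
  | p :: t, i, st => if p > st.2.2 then runA3 t (i + 1) (i, i + 1, p) else runA3 t (i + 1) st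

theorem le_foldl_max_int (t : List Int) (m : Int) : m ≤ t.foldl max m := by
  induction t generalizing m with
  | nil => simp
  | cons p t ih => exact le_trans (le_max_left m p) (ih (max m p))

theorem foldl_max_mem (t : List Int) (m : Int) : t.foldl max m = m ∨ t.foldl max m ∈ t := by
  induction t generalizing m with
  | nil => simp
  | cons p t ih =>
    rw [List.foldl_cons]
    rcases ih (max m p) with h | h
    · rcases max_cases m p with ⟨he, _⟩ | ⟨he, _⟩
      · left; rw [h, he]
      · right; rw [h, he]; exact List.mem_cons_self
    · right; exact List.mem_cons_of_mem _ h

theorem index?_of_mem (l : List Int) (v : Int) (h : v ∈ l) :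
    PySem.List.index? l v = some (l.idxOf v) := by
  induction l with
  | nil => simp at h
  | cons x t ih =>
    by_cases hx : x = v
    · subst hx
      rw [PySem.List.index?_cons_self, List.idxOf_cons_self]
    · have hv : v ∈ t := by
        rcases List.mem_cons.mp h with h' | h'
        · exact absurd h'.symm hx
        · exact h'
      rw [PySem.List.index?_cons_of_ne t hx, ih hv, List.idxOf_cons_ne t hx]
      rfl

theorem runA3_spec (t : List Int) : ∀ (i a b m : Int),
    runA3 t i (a, b, m) =
      if t.foldl max m > m then
        (i + (t.idxOf (t.foldl max m) : Int), i + (t.idxOf (t.foldl max m) : Int) + 1, t.foldl max m)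
      else (a, b, m) := by
  induction t with
  | nil => intro i a b m; simp [runA3]
  | cons p t ih =>
    intro i a b m
    rw [List.foldl_cons]
    by_cases hp : p > m
    · have hmp : max m p = p := max_eq_right (le_of_lt hp)
      rw [hmp]
      have hgt : t.foldl max p > m := by
        have := le_foldl_max_int t p; omega
      rw [if_pos hgt]
      rw [runA3, if_pos hp, ih (i + 1) i (i + 1) p]
      by_cases hM : t.foldl max p > p
      · have hne : p ≠ t.foldl max p := by omega
        rw [if_pos hM, List.idxOf_cons_ne t hne]
        simp only [Prod.mk.injEq]
        refine ⟨by push_cast; ring, by push_cast; ring, trivial⟩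
      · have heq : t.foldl max p = p := le_antisymm (by omega) (le_foldl_max_int t p)
        rw [if_neg hM, heq, List.idxOf_cons_self]
        simp only [Prod.mk.injEq]
        refine ⟨by push_cast; ring, by push_cast; ring, trivial⟩
    · have hmp : max m p = m := max_eq_left (by omega)
      rw [hmp, runA3, if_neg hp, ih (i + 1) a b m]
      by_cases hM : t.foldl max m > m
      · have hne : p ≠ t.foldl max m := by omega
        rw [if_pos hM, if_pos hM, List.idxOf_cons_ne t hne]
        simp only [Prod.mk.injEq]
        refine ⟨by push_cast; ring, by push_cast; ring, trivial⟩
      · rw [if_neg hM, if_neg hM]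

-- the adjacent-products table
def prods (l : List Int) : List Int := List.zipWith (· * ·) l l.tail

theorem length_prods (l : List Int) : (prods l).length = l.length - 1 := by
  simp [prods]

theorem prods_get (l : List Int) (j : Nat) (hj : j < (prods l).length) :
    PySem.List.pyGetD l (j : Int) 0 * PySem.List.pyGetD l ((j : Int) + 1) 0 = (prods l)[j] := by
  have hlen := length_prods l
  have hj1 : j + 1 < l.length := by omega
  have hj0 : j < l.length := by omega
  have h1 : ((j : Int) + 1) = ((j + 1 : Nat) : Int) := by push_cast; ring
  rw [h1, PySem.List.pyGetD_natCast, PySem.List.pyGetD_natCast]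
  have hjt : j < l.tail.length := by simp [List.length_tail]; omega
  simp [prods, List.getElem_zipWith, List.getD_eq_getElem?_getD,
    List.getElem?_eq_getElem hj0, List.getElem?_eq_getElem hj1, List.getElem_tail]

theorem fold_runA3 (l : List Int) : ∀ (k j : Nat) (st : Int × Int × Int),
    j + k + 1 = l.length →
    (PySem.List.pyRange (j : Int) ((l.length : Int) - 1) 1).foldl (stepA l) st
      = runA3 ((prods l).drop j) (j : Int) st := by
  intro k
  induction k with
  | zero =>
    intro j st hlen
    have hb : ((l.length : Int) - 1) ≤ (j : Int) := by omega
    rw [PySem.List.pyRange_one_eq_nil hb]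
    have hd : (prods l).drop j = [] := by
      apply List.drop_eq_nil_of_le; rw [length_prods]; omega
    rw [hd]
    rfl
  | succ k ih =>
    intro j st hlen
    obtain ⟨a, b, m⟩ := st
    have hjb : (j : Int) < (l.length : Int) - 1 := by omega
    rw [PySem.List.pyRange_one_cons hjb]
    have hj : j < (prods l).length := by rw [length_prods]; omega
    have hdrop : (prods l).drop j = (prods l)[j] :: (prods l).drop (j + 1) :=
      List.drop_eq_getElem_cons hj
    rw [List.foldl_cons, hdrop, runA3]
    have h1 : ((j : Int) + 1) = ((j + 1 : Nat) : Int) := by push_cast; ring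
    by_cases hgt : (prods l)[j] > m
    · have hs : stepA l (a, b, m) (j : Int) = ((j : Int), (j : Int) + 1, (prods l)[j]) := by
        simp only [stepA]
        rw [prods_get l j hj, if_pos hgt]
      rw [hs, if_pos hgt, h1, ih (j + 1) _ (by omega)]
    · have hs : stepA l (a, b, m) (j : Int) = (a, b, m) := by
        simp only [stepA]
        rw [prods_get l j hj, if_neg (by omega)]
      rw [hs, if_neg (by omega), h1, ih (j + 1) _ (by omega)]

-- ===== VERDICT (by name: the statement is the Claim_ definition above) =====
theorem MaxAdjacentProduct_spec : Claim_equal_MaxAdjacentProduct := by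
  intro l _ hpre
  unfold Spec_MaxAdjacentProduct MaxAdjacentProduct
  simp only [MaxAdjacentProduct_alt]
  have hlen : 2 ≤ l.length := hpre
  rw [PySem.List.slice_from_one l]
  have hZ : List.zipWith (· * ·) l l.tail = prods l := rfl
  rw [hZ]
  have hplen : (prods l).length = l.length - 1 := length_prods l
  obtain ⟨p0, tp, hps0⟩ : ∃ p0 tp, prods l = p0 :: tp := by
    cases h : prods l with
    | nil => exfalso; rw [h] at hplen; simp at hplen; omega
    | cons p t => exact ⟨p, t, rfl⟩
  -- A's initial max is products[0]
  have h00 : PySem.List.pyGetD l 0 0 * PySem.List.pyGetD l 1 0 = p0 := by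
    have h := prods_get l 0 (by omega)
    simp only [Nat.cast_zero, zero_add, hps0, List.getElem_cons_zero] at h
    exact h
  have hdrop1 : (prods l).drop 1 = tp := by rw [hps0]; rfl
  have hfold := fold_runA3 l (l.length - 2) 1 (0, 1, p0) (by omega)
  simp only [Nat.cast_one, hdrop1] at hfold
  rw [h00, hfold, runA3_spec]
  have hbest : PySem.List.max? (prods l) (fun y => y) = some (tp.foldl max p0) := by
    rw [hps0]; exact PySem.List.max?_id_cons p0 tp
  set M := tp.foldl max p0 with hM
  by_cases hgt : M > p0
  · have hmem : M ∈ tp := by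
      rcases foldl_max_mem tp p0 with h | h
      · omega
      · exact h
    have hne : p0 ≠ M := by omega
    have hidx : PySem.List.index? (prods l) M = some (tp.idxOf M + 1) := by
      rw [hps0, PySem.List.index?_cons_of_ne tp hne, index?_of_mem tp M hmem]
      rfl
    rw [if_pos hgt, hbest]
    simp only [Option.getD_some]
    rw [hidx]
    simp only [Option.getD_some, Prod.mk.injEq]
    refine ⟨by push_cast; ring, by push_cast; ring, trivial⟩
  · have hle : p0 ≤ M := le_foldl_max_int tp p0
    have heq : M = p0 := by omega
    have hidx : PySem.List.index? (prods l) M = some 0 := by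
      rw [hps0, heq]; exact PySem.List.index?_cons_self p0 tp
    rw [if_neg hgt, hbest]
    simp only [Option.getD_some]
    rw [hidx, heq]
    simp
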